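-- pv_equiv track=rewrite | github.com/LackOfSkillz/DireEngine | world/systems/warrior/progression.py | get_next_warrior_unlock
-- ===== SOURCE A (Python) =====
-- WARRIOR_UNLOCKS = {
--     5: ["surge"],
--     10: ["intimidate"],
--     15: ["rally"],
--     20: ["crush"],
--     25: ["press"],
--     30: ["sweep"],
--     35: ["secondwind"],
--     40: ["whirl"],
--     45: ["hold"],
--     50: ["frenzy"],
-- }
--
-- def get_next_warrior_unlock(circle):
--     circle = max(1, int(circle or 1))
--     upcoming = []
--     for unlock_circle, abilities in sorted(WARRIOR_UNLOCKS.items()):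
--         if unlock_circle > circle:
--             upcoming.extend((unlock_circle, ability_key) for ability_key in abilities)
--             break
--     return upcoming
-- ===== SOURCE B (Python) =====
-- WARRIOR_UNLOCKS = {
--     5: ["surge"],
--     10: ["intimidate"],
--     15: ["rally"],
--     20: ["crush"],
--     25: ["press"],
--     30: ["sweep"],
--     35: ["secondwind"],
--     40: ["whirl"],
--     45: ["hold"],
--     50: ["frenzy"],
-- }
--
-- def get_next_warrior_unlock(circle):
--     circle = max(1, int(circle or 1))
--     next_circle = min((k for k in WARRIOR_UNLOCKS if k > circle), default=None)
--     if next_circle is None: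
--         return []
--     return [(next_circle, ability) for ability in WARRIOR_UNLOCKS[next_circle]]
-- ===== Notes on version B (the rewrite author's own statement) =====
-- stated objective: simpler
-- what changed: Replaces the sort-then-linear-scan-with-break over dict items by computing the next unlock circle directly as min of the keys above circle, then one indexed lookup to build the result.
import Mathlib
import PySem

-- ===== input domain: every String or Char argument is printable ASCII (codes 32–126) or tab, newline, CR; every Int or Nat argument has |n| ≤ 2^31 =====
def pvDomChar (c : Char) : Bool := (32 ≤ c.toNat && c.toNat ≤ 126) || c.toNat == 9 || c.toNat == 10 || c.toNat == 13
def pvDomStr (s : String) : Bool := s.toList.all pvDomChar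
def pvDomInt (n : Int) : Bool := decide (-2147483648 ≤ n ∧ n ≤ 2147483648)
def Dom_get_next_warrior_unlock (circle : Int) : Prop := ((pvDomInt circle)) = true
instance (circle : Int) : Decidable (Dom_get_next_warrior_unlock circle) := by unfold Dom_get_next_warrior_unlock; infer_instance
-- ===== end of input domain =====

-- B computes the next unlock circle as min of keys above circle plus one lookup, instead of A's sorted scan with break (simpler decomposition).

-- ===== PORT A =====
-- WARRIOR_UNLOCKS as an insertion-ordered dict (association list)
def warriorUnlocks : PySem.Dict Int (List String) := PySem.Dict.ofList
  [(5, ["surge"]), (10, ["intimidate"]), (15, ["rally"]), (20, ["crush"]),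
   (25, ["press"]), (30, ["sweep"]), (35, ["secondwind"]), (40, ["whirl"]),
   (45, ["hold"]), (50, ["frenzy"])]

-- the for-loop with break: stop at the first sorted item whose key exceeds c
def warriorLoopA (c : Int) : List (Int × List String) → List (Int × String)
  | [] => []
  | (k, abilities) :: rest =>
    if k > c then abilities.map (fun a => (k, a)) else warriorLoopA c rest

-- sorted(WARRIOR_UNLOCKS.items()): keys are distinct, so Python's tuple order equals order by key
def get_next_warrior_unlock (circle : Int) : List (Int × String) :=
  let c := max 1 (if circle = 0 then 1 else circle)   -- max(1, int(circle or 1))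
  warriorLoopA c (PySem.List.sorted warriorUnlocks.items (fun p => p.1) false)

-- ===== PORT B =====
def get_next_warrior_unlock_alt (circle : Int) : List (Int × String) :=
  let c := max 1 (if circle = 0 then 1 else circle)
  match PySem.List.min? (warriorUnlocks.keys.filter (fun k => decide (k > c))) (fun k => k) with
  | none => []
  | some nextCircle =>
    match warriorUnlocks.get? nextCircle with   -- key comes from the dict, so always found
    | some abilities => abilities.map (fun a => (nextCircle, a))
    | none => []

-- ===== PRECONDITION & SPEC =====
def Spec_get_next_warrior_unlock (circle : Int) (out : List (Int × String)) : Prop := out = get_next_warrior_unlock_alt circle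
instance (circle : Int) (out : List (Int × String)) : Decidable (Spec_get_next_warrior_unlock circle out) := by unfold Spec_get_next_warrior_unlock; infer_instance

-- ===== CLAIM (what is proved, stated in full; the proofs are below) =====
def Claim_equal_get_next_warrior_unlock : Prop := ∀ (circle : Int), Dom_get_next_warrior_unlock circle → Spec_get_next_warrior_unlock circle (get_next_warrior_unlock circle)

-- ===== LEMMAS AND PROOFS =====

-- proof-only helper: A's break-at-first-greater scan equals B's min-of-filtered-keys lookup
theorem warriorLoop_eq_min (c : Int) :
    warriorLoopA c warriorUnlocks.items =
      (match PySem.List.min? (warriorUnlocks.keys.filter (fun k => decide (k > c))) (fun k => k) with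
       | none => []
       | some nextCircle =>
         match warriorUnlocks.get? nextCircle with
         | some abilities => abilities.map (fun a => (nextCircle, a))
         | none => []) := by
  rw [show warriorUnlocks.keys = [5, 10, 15, 20, 25, 30, 35, 40, 45, 50] from by decide]
  rw [show warriorUnlocks.items =
      [(5, ["surge"]), (10, ["intimidate"]), (15, ["rally"]), (20, ["crush"]),
       (25, ["press"]), (30, ["sweep"]), (35, ["secondwind"]), (40, ["whirl"]),
       (45, ["hold"]), (50, ["frenzy"])] from by decide]
  by_cases h5 : c < (5:Int)
  · simp [warriorLoopA, List.filter, PySem.List.min?, show c < (5:Int) by omega, show c < (10:Int) by omega, show c < (15:Int) by omega, show c < (20:Int) by omega, show c < (25:Int) by omega, show c < (30:Int) by omega, show c < (35:Int) by omega, show c < (40:Int) by omega, show c < (45:Int) by omega, show c < (50:Int) by omega]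
    try decide
  by_cases h10 : c < (10:Int)
  · simp [warriorLoopA, List.filter, PySem.List.min?, show ¬ c < (5:Int) by omega, show c < (10:Int) by omega, show c < (15:Int) by omega, show c < (20:Int) by omega, show c < (25:Int) by omega, show c < (30:Int) by omega, show c < (35:Int) by omega, show c < (40:Int) by omega, show c < (45:Int) by omega, show c < (50:Int) by omega]
    try decide
  by_cases h15 : c < (15:Int)
  · simp [warriorLoopA, List.filter, PySem.List.min?, show ¬ c < (5:Int) by omega, show ¬ c < (10:Int) by omega, show c < (15:Int) by omega, show c < (20:Int) by omega, show c < (25:Int) by omega, show c < (30:Int) by omega, show c < (35:Int) by omega, show c < (40:Int) by omega, show c < (45:Int) by omega, show c < (50:Int) by omega]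
    try decide
  by_cases h20 : c < (20:Int)
  · simp [warriorLoopA, List.filter, PySem.List.min?, show ¬ c < (5:Int) by omega, show ¬ c < (10:Int) by omega, show ¬ c < (15:Int) by omega, show c < (20:Int) by omega, show c < (25:Int) by omega, show c < (30:Int) by omega, show c < (35:Int) by omega, show c < (40:Int) by omega, show c < (45:Int) by omega, show c < (50:Int) by omega]
    try decide
  by_cases h25 : c < (25:Int)
  · simp [warriorLoopA, List.filter, PySem.List.min?, show ¬ c < (5:Int) by omega, show ¬ c < (10:Int) by omega, show ¬ c < (15:Int) by omega, show ¬ c < (20:Int) by omega, show c < (25:Int) by omega, show c < (30:Int) by omega, show c < (35:Int) by omega, show c < (40:Int) by omega, show c < (45:Int) by omega, show c < (50:Int) by omega]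
    try decide
  by_cases h30 : c < (30:Int)
  · simp [warriorLoopA, List.filter, PySem.List.min?, show ¬ c < (5:Int) by omega, show ¬ c < (10:Int) by omega, show ¬ c < (15:Int) by omega, show ¬ c < (20:Int) by omega, show ¬ c < (25:Int) by omega, show c < (30:Int) by omega, show c < (35:Int) by omega, show c < (40:Int) by omega, show c < (45:Int) by omega, show c < (50:Int) by omega]
    try decide
  by_cases h35 : c < (35:Int)
  · simp [warriorLoopA, List.filter, PySem.List.min?, show ¬ c < (5:Int) by omega, show ¬ c < (10:Int) by omega, show ¬ c < (15:Int) by omega, show ¬ c < (20:Int) by omega, show ¬ c < (25:Int) by omega, show ¬ c < (30:Int) by omega, show c < (35:Int) by omega, show c < (40:Int) by omega, show c < (45:Int) by omega, show c < (50:Int) by omega]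
    try decide
  by_cases h40 : c < (40:Int)
  · simp [warriorLoopA, List.filter, PySem.List.min?, show ¬ c < (5:Int) by omega, show ¬ c < (10:Int) by omega, show ¬ c < (15:Int) by omega, show ¬ c < (20:Int) by omega, show ¬ c < (25:Int) by omega, show ¬ c < (30:Int) by omega, show ¬ c < (35:Int) by omega, show c < (40:Int) by omega, show c < (45:Int) by omega, show c < (50:Int) by omega]
    try decide
  by_cases h45 : c < (45:Int)
  · simp [warriorLoopA, List.filter, PySem.List.min?, show ¬ c < (5:Int) by omega, show ¬ c < (10:Int) by omega, show ¬ c < (15:Int) by omega, show ¬ c < (20:Int) by omega, show ¬ c < (25:Int) by omega, show ¬ c < (30:Int) by omega, show ¬ c < (35:Int) by omega, show ¬ c < (40:Int) by omega, show c < (45:Int) by omega, show c < (50:Int) by omega]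
    try decide
  by_cases h50 : c < (50:Int)
  · simp [warriorLoopA, List.filter, PySem.List.min?, show ¬ c < (5:Int) by omega, show ¬ c < (10:Int) by omega, show ¬ c < (15:Int) by omega, show ¬ c < (20:Int) by omega, show ¬ c < (25:Int) by omega, show ¬ c < (30:Int) by omega, show ¬ c < (35:Int) by omega, show ¬ c < (40:Int) by omega, show ¬ c < (45:Int) by omega, show c < (50:Int) by omega]
    try decide
  · simp [warriorLoopA, List.filter, PySem.List.min?, show ¬ c < (5:Int) by omega, show ¬ c < (10:Int) by omega, show ¬ c < (15:Int) by omega, show ¬ c < (20:Int) by omega, show ¬ c < (25:Int) by omega, show ¬ c < (30:Int) by omega, show ¬ c < (35:Int) by omega, show ¬ c < (40:Int) by omega, show ¬ c < (45:Int) by omega, show ¬ c < (50:Int) by omega]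
    try decide

-- ===== VERDICT (by name: the statement is the Claim_ definition above) =====
theorem get_next_warrior_unlock_spec : Claim_equal_get_next_warrior_unlock := by
  intro circle _
  unfold Spec_get_next_warrior_unlock get_next_warrior_unlock get_next_warrior_unlock_alt
  dsimp only
  rw [show PySem.List.sorted warriorUnlocks.items (fun p => p.1) = warriorUnlocks.items from by decide]
  exact warriorLoop_eq_min _
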